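-- pv_equiv track=rewrite | github.com/innazh/algo-practice | Arrays/Medium/ValidSudoku.py | validSubBox
-- ===== SOURCE A (Python) =====
-- def validSubBox(box):
--     nums = set()
--     for i in range(len(box)):
--         for j in range(len(box[0])):
--             if box[i][j] in nums:
--                 return False
--             if box[i][j]!='.':
--                 nums.add(box[i][j])
--     return True
-- ===== SOURCE B (Python) =====
-- def validSubBox(box):
--     vals = [box[i][j]
--             for i in range(len(box))
--             for j in range(len(box[0]))
--             if box[i][j] != '.']
--     return len(vals) == len(set(vals))
-- ===== Notes on version B (the rewrite author's own statement) =====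
-- stated objective: simpler
-- what changed: Replaces the running-set membership test with early return by a single collect pass (flatten all non-dot cells, using len(box[0]) as the column bound like A) followed by one count comparison len(vals) == len(set(vals)).
-- outside the precondition, e.g. on validSubBox([['1', '1'], ['2']]): A returns False, B raises IndexError
import Mathlib
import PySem

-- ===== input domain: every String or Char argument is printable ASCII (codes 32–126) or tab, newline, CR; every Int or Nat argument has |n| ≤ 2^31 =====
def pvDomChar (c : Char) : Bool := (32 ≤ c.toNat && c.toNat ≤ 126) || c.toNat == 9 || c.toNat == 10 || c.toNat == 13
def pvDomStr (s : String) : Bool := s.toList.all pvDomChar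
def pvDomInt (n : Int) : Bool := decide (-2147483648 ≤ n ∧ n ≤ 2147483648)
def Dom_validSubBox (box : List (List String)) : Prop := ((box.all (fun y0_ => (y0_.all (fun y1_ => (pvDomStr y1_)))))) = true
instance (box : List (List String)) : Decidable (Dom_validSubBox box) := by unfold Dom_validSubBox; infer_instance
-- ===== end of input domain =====

-- B collects all non-dot cells in one pass and compares count with distinct count,
-- instead of A's running set with early return. Equivalence of RETURN values only.

-- ===== PORT A =====
-- inner loop 'for j in js': none = early 'return False' (or IndexError, excluded by Pre_)
def innerA (row : List String) (js : List Int) (nums : PySem.Set String) :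
    Option (PySem.Set String) :=
  match js with
  | [] => some nums
  | j :: rest =>
    match PySem.List.pyGet? row j with
    | none => none            -- IndexError box[i][j]; excluded by Pre_validSubBox
    | some v =>
      if PySem.Set.contains nums v then none
      else innerA row rest (if v ≠ "." then PySem.Set.add nums v else nums)

-- outer loop 'for i in is'
def outerA (box : List (List String)) (is : List Int) (nums : PySem.Set String) : Bool :=
  match is with
  | [] => true
  | i :: rest =>
    match PySem.List.pyGet? box i with
    | none => false           -- unreachable: i ∈ range(len(box))
    | some row =>
      match PySem.List.pyGet? box 0 with
      | none => false         -- IndexError len(box[0]); unreachable (box nonempty here)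
      | some r0 =>
        match innerA row (PySem.List.pyRange 0 (r0.length : Int) 1) nums with
        | none => false       -- 'return False'
        | some nums' => outerA box rest nums'

def validSubBox (box : List (List String)) : Bool :=
  outerA box (PySem.List.pyRange 0 (box.length : Int) 1) PySem.Set.empty

-- ===== PORT B =====
-- one row of the comprehension: [row[j] for j in range(m) if row[j] != '.']
def valsRowB (row : List String) (m : Int) : List String :=
  (PySem.List.pyRange 0 m 1).filterMap (fun j =>
    match PySem.List.pyGet? row j with
    | none => none            -- IndexError; excluded by Pre_validSubBox
    | some v => if v ≠ "." then some v else none)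

def validSubBox_alt (box : List (List String)) : Bool :=
  let vals := (PySem.List.pyRange 0 (box.length : Int) 1).flatMap (fun i =>
    match PySem.List.pyGet? box i, PySem.List.pyGet? box 0 with
    | some row, some r0 => valsRowB row (r0.length : Int)
    | _, _ => [])
  vals.length == (PySem.Set.ofList vals).length

-- ===== PRECONDITION & SPEC =====
-- Pre_ excludes ragged boxes whose first row is longer than some other row: there
-- Python indexes box[i][j] past the end of row i, which raises IndexError in both A and B
-- (in A possibly only after an early 'return False' on a duplicate found before the short row).
def Pre_validSubBox (box : List (List String)) : Prop :=
  ∀ row ∈ box, (box.headD []).length ≤ row.length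

instance (box : List (List String)) : Decidable (Pre_validSubBox box) := by
  unfold Pre_validSubBox; infer_instance

def pvWitness_validSubBox : List (List String) :=
  [["5", "3", "."], [".", "7", "1"], ["6", ".", "9"]]

def Spec_validSubBox (box : List (List String)) (out : Bool) : Prop := out = validSubBox_alt box
instance (box : List (List String)) (out : Bool) : Decidable (Spec_validSubBox box out) := by unfold Spec_validSubBox; infer_instance

-- ===== CLAIM (what is proved, stated in full; the proofs are below) =====
def Claim_equal_validSubBox : Prop := ∀ (box : List (List String)), Dom_validSubBox box → Pre_validSubBox box → Spec_validSubBox box (validSubBox box)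

-- ===== LEMMAS AND PROOFS =====

-- list-level versions of A's two loops
def innerL : List String → PySem.Set String → Option (PySem.Set String)
  | [], nums => some nums
  | v :: rest, nums =>
    if PySem.Set.contains nums v then none
    else innerL rest (if v ≠ "." then PySem.Set.add nums v else nums)

def outerL : List (List String) → PySem.Set String → Bool
  | [], _ => true
  | cells :: rest, nums =>
    match innerL cells nums with
    | none => false
    | some nums' => outerL rest nums'

theorem innerA_eq_innerL (row : List String) (m : Nat) (hm : m ≤ row.length) :
    ∀ (k j : Nat), m - j ≤ k → ∀ s,
      innerA row (PySem.List.pyRange (j : Int) (m : Int) 1) s = innerL ((row.take m).drop j) s := by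
  intro k
  induction k with
  | zero =>
    intro j hj s
    have hmj : m ≤ j := by omega
    rw [PySem.List.pyRange_one_eq_nil (by exact_mod_cast hmj)]
    rw [List.drop_eq_nil_of_le (by simp; omega)]
    rfl
  | succ k ih =>
    intro j hj s
    by_cases hjm : j < m
    · rw [PySem.List.pyRange_one_cons (by exact_mod_cast hjm)]
      have hjr : j < row.length := by omega
      have hget : PySem.List.pyGet? row (j : Int) = some row[j] :=
        PySem.List.pyGet?_ofNat (h := hjr)
      have hdrop : (row.take m).drop j = row[j] :: (row.take m).drop (j + 1) := by
        rw [List.drop_eq_getElem_cons (by simp; omega)]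
        simp [List.getElem_take]
      simp only [innerA, hget, hdrop, innerL]
      split
      · rfl
      · have : ((j : Int) + 1) = ((j + 1 : Nat) : Int) := by push_cast; ring
        rw [this, ih (j + 1) (by omega)]
    · have hmj : m ≤ j := by omega
      rw [PySem.List.pyRange_one_eq_nil (by exact_mod_cast hmj)]
      rw [List.drop_eq_nil_of_le (by simp; omega)]
      rfl

theorem outerA_eq_outerL (box : List (List String)) (hpre : Pre_validSubBox box) :
    ∀ (k i : Nat), box.length - i ≤ k → ∀ s,
      outerA box (PySem.List.pyRange (i : Int) (box.length : Int) 1) s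
        = outerL ((box.drop i).map (fun r => r.take (box.headD []).length)) s := by
  intro k
  induction k with
  | zero =>
    intro i hi s
    have : box.length ≤ i := by omega
    rw [PySem.List.pyRange_one_eq_nil (by exact_mod_cast this)]
    rw [List.drop_eq_nil_of_le this]
    rfl
  | succ k ih =>
    intro i hi s
    by_cases him : i < box.length
    · rw [PySem.List.pyRange_one_cons (by exact_mod_cast him)]
      have hbne : box ≠ [] := by intro h; simp [h] at him
      have hget : PySem.List.pyGet? box (i : Int) = some box[i] :=
        PySem.List.pyGet?_ofNat (h := him)
      have h0 : PySem.List.pyGet? box 0 = some (box.headD []) := by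
        cases box with
        | nil => simp at him
        | cons r rs => simp
      have hdrop : box.drop i = box[i] :: box.drop (i + 1) :=
        List.drop_eq_getElem_cons him
      simp only [outerA, hget, h0, hdrop, List.map_cons, outerL]
      have hrow : innerA box[i] (PySem.List.pyRange 0 ((box.headD []).length : Int) 1) s
          = innerL (box[i].take (box.headD []).length) s := by
        have h0' : ((0 : Nat) : Int) = (0 : Int) := rfl
        have := innerA_eq_innerL box[i] (box.headD []).length
          (hpre box[i] (List.getElem_mem him)) ((box.headD []).length) 0 (by omega) s
        simpa using this
      rw [hrow]
      split
      · rfl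
      · have : ((i : Int) + 1) = ((i + 1 : Nat) : Int) := by push_cast; ring
        rw [this, ih (i + 1) (by omega)]
    · have : box.length ≤ i := by omega
      rw [PySem.List.pyRange_one_eq_nil (by exact_mod_cast this)]
      rw [List.drop_eq_nil_of_le this]
      rfl

theorem innerL_append (xs ys : List String) (s : PySem.Set String) :
    innerL (xs ++ ys) s = (innerL xs s).bind (fun t => innerL ys t) := by
  induction xs generalizing s with
  | nil => simp [innerL]
  | cons v rest ih =>
    simp only [List.cons_append, innerL]
    split
    · rfl
    · exact ih _

theorem outerL_eq_isSome (rows : List (List String)) (s : PySem.Set String) :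
    outerL rows s = (innerL rows.flatten s).isSome := by
  induction rows generalizing s with
  | nil => simp [outerL, innerL]
  | cons cells rest ih =>
    simp only [outerL, List.flatten_cons, innerL_append]
    cases h : innerL cells s with
    | none => simp
    | some t => simp [ih t]

-- characterization of innerL on a clean set
theorem innerL_characterize (cells : List String) :
    ∀ (s : PySem.Set String), s.Nodup → "." ∉ s →
      innerL cells s =
        if (cells.filter (fun v => v ≠ ".")).Nodup ∧ ∀ v ∈ cells, v ≠ "." → v ∉ s
        then some (PySem.Set.update s (cells.filter (fun v => v ≠ ".")))
        else none := by
  induction cells with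
  | nil => intro s _ _; simp [innerL, PySem.Set.update]
  | cons v rest ih =>
    intro s hnd hdot
    by_cases hv : v = "."
    · subst hv
      have hc : PySem.Set.contains s "." = false := by
        by_contra h
        exact hdot ((PySem.Set.contains_iff s ".").1 (by simpa using h))
      have hstep : innerL ("." :: rest) s = innerL rest s := by
        simp [innerL, hdot]
      rw [hstep, ih s hnd hdot]
      have hf : ("." :: rest).filter (fun u => u ≠ ".") = rest.filter (fun u => u ≠ ".") := by
        simp
      rw [hf]
      by_cases hcond : (rest.filter (fun u => u ≠ ".")).Nodup ∧ ∀ u ∈ rest, u ≠ "." → u ∉ s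
      · rw [if_pos hcond, if_pos]
        refine ⟨hcond.1, ?_⟩
        intro u hu hune
        rcases List.mem_cons.1 hu with h | h
        · exact absurd h hune
        · exact hcond.2 u h hune
      · rw [if_neg hcond, if_neg]
        rintro ⟨h1, h2⟩
        exact hcond ⟨h1, fun u hu hune => h2 u (List.mem_cons_of_mem _ hu) hune⟩
    · by_cases hmem : v ∈ s
      · have hc : PySem.Set.contains s v = true := (PySem.Set.contains_iff s v).2 hmem
        have hstep : innerL (v :: rest) s = none := by simp [innerL, hmem]
        rw [hstep, if_neg]
        rintro ⟨-, hall⟩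
        exact hall v (List.mem_cons_self) hv hmem
      · have hc : PySem.Set.contains s v = false := by
          by_contra h
          exact hmem ((PySem.Set.contains_iff s v).1 (by simpa using h))
        have hadd : PySem.Set.add s v = s ++ [v] := PySem.Set.add_of_not_mem hmem
        have hstep : innerL (v :: rest) s = innerL rest (s ++ [v]) := by
          simp [innerL, hmem, hv]
        rw [hstep, ih (s ++ [v])
              (by simp only [List.nodup_append, List.nodup_cons]
                  refine ⟨hnd, by simp, ?_⟩
                  intro a ha b hb
                  simp only [List.mem_singleton] at hb
                  subst hb
                  exact fun h => hmem (h ▸ ha))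
              (by simp [hdot]; exact fun h => hv h.symm)]
        have hfv : (v :: rest).filter (fun u => u ≠ ".") = v :: rest.filter (fun u => u ≠ ".") := by
          simp [hv]
        by_cases hcond : (rest.filter (fun u => u ≠ ".")).Nodup ∧
            (∀ u ∈ rest, u ≠ "." → u ∉ s ++ [v])
        · rw [if_pos hcond, if_pos]
          · rw [hfv, ← hadd, ← PySem.Set.update_cons]
          · constructor
            · rw [hfv]
              refine List.Nodup.cons ?_ hcond.1
              intro hvin
              have := hcond.2 v (List.mem_filter.1 hvin).1 hv
              simp at this
            · intro u hu hune
              rcases List.mem_cons.1 hu with h | h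
              · subst h; exact hmem
              · intro hus
                exact hcond.2 u h hune (List.mem_append_left _ hus)
        · rw [if_neg hcond, if_neg]
          rintro ⟨hnd2, hall2⟩
          apply hcond
          rw [hfv] at hnd2
          refine ⟨hnd2.of_cons, ?_⟩
          intro u hu hune hus
          rcases List.mem_append.1 hus with h | h
          · exact hall2 u (List.mem_cons_of_mem _ hu) hune h
          · simp at h
            subst h
            exact (List.nodup_cons.1 hnd2).1 (List.mem_filter.2 ⟨hu, by simpa using hune⟩)

theorem ofList_sublist (l : List String) : List.Sublist (PySem.Set.ofList l) l := by
  induction l using List.reverseRecOn with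
  | nil => simp [PySem.Set.ofList]
  | append_singleton xs x ih =>
    rw [PySem.Set.ofList_append_singleton, PySem.Set.add_eq_ite]
    split
    · exact ih.trans (List.sublist_append_left xs [x])
    · exact List.Sublist.append ih (List.Sublist.refl [x])

theorem length_ofList_eq_iff (l : List String) :
    (PySem.Set.ofList l).length = l.length ↔ l.Nodup := by
  constructor
  · intro h
    have := (ofList_sublist l).eq_of_length h
    rw [← this]
    exact PySem.Set.nodup_ofList l
  · intro h
    rw [PySem.Set.ofList_eq_self_of_nodup (xs := l) h]

theorem valsRowB_eq (row : List String) (m : Nat) (hm : m ≤ row.length) :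
    ∀ (k j : Nat), m - j ≤ k →
      (PySem.List.pyRange (j : Int) (m : Int) 1).filterMap (fun j' =>
        match PySem.List.pyGet? row j' with
        | none => none
        | some v => if v ≠ "." then some v else none)
      = ((row.take m).drop j).filter (fun v => v ≠ ".") := by
  intro k
  induction k with
  | zero =>
    intro j hj
    have hmj : m ≤ j := by omega
    rw [PySem.List.pyRange_one_eq_nil (by exact_mod_cast hmj)]
    rw [List.drop_eq_nil_of_le (by simp; omega)]
    rfl
  | succ k ih =>
    intro j hj
    by_cases hjm : j < m
    · rw [PySem.List.pyRange_one_cons (by exact_mod_cast hjm)]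
      have hjr : j < row.length := by omega
      have hget : PySem.List.pyGet? row (j : Int) = some row[j] :=
        PySem.List.pyGet?_ofNat (h := hjr)
      have hdrop : (row.take m).drop j = row[j] :: (row.take m).drop (j + 1) := by
        rw [List.drop_eq_getElem_cons (by simp; omega)]
        simp [List.getElem_take]
      rw [List.filterMap_cons, hdrop, List.filter_cons]
      have : ((j : Int) + 1) = ((j + 1 : Nat) : Int) := by push_cast; ring
      rw [this, ih (j + 1) (by omega)]
      simp only [hget]
      by_cases hne : row[j] = "."
      · simp [hne]
      · simp [hne]
    · have hmj : m ≤ j := by omega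
      rw [PySem.List.pyRange_one_eq_nil (by exact_mod_cast hmj)]
      rw [List.drop_eq_nil_of_le (by simp; omega)]
      rfl

theorem valsB_eq (box : List (List String)) (hpre : Pre_validSubBox box) :
    ∀ (k i : Nat), box.length - i ≤ k →
      (PySem.List.pyRange (i : Int) (box.length : Int) 1).flatMap (fun i' =>
        match PySem.List.pyGet? box i', PySem.List.pyGet? box 0 with
        | some row, some r0 => valsRowB row (r0.length : Int)
        | _, _ => [])
      = (((box.drop i).map (fun r => r.take (box.headD []).length)).flatten).filter
          (fun v => v ≠ ".") := by
  intro k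
  induction k with
  | zero =>
    intro i hi
    have : box.length ≤ i := by omega
    rw [PySem.List.pyRange_one_eq_nil (by exact_mod_cast this)]
    rw [List.drop_eq_nil_of_le this]
    rfl
  | succ k ih =>
    intro i hi
    by_cases him : i < box.length
    · rw [PySem.List.pyRange_one_cons (by exact_mod_cast him)]
      have hget : PySem.List.pyGet? box (i : Int) = some box[i] :=
        PySem.List.pyGet?_ofNat (h := him)
      have h0 : PySem.List.pyGet? box 0 = some (box.headD []) := by
        cases box with
        | nil => simp at him
        | cons r rs => simp
      have hdrop : box.drop i = box[i] :: box.drop (i + 1) :=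
        List.drop_eq_getElem_cons him
      rw [List.flatMap_cons, hdrop, List.map_cons, List.flatten_cons, List.filter_append]
      have : ((i : Int) + 1) = ((i + 1 : Nat) : Int) := by push_cast; ring
      rw [this, ih (i + 1) (by omega)]
      simp only [hget, h0]
      congr 1
      have := valsRowB_eq box[i] (box.headD []).length
        (hpre box[i] (List.getElem_mem him)) ((box.headD []).length) 0 (by omega)
      unfold valsRowB
      simpa using this
    · have : box.length ≤ i := by omega
      rw [PySem.List.pyRange_one_eq_nil (by exact_mod_cast this)]
      rw [List.drop_eq_nil_of_le this]
      rfl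

-- ===== VERDICT (by name: the statement is the Claim_ definition above) =====
theorem validSubBox_spec : Claim_equal_validSubBox := by
  intro box _hdom hpre
  unfold Spec_validSubBox validSubBox validSubBox_alt
  have hA := outerA_eq_outerL box hpre box.length 0 (by omega) PySem.Set.empty
  have hB := valsB_eq box hpre box.length 0 (by omega)
  simp only [Nat.cast_zero, List.drop_zero] at hA hB
  rw [hA, outerL_eq_isSome, hB]
  set cells := ((box.map (fun r => r.take (box.headD []).length)).flatten) with hc
  rw [innerL_characterize cells PySem.Set.empty (by simp [PySem.Set.empty])
        (by simp [PySem.Set.empty])]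
  have hfe : (∀ v ∈ cells, v ≠ "." → v ∉ (PySem.Set.empty : PySem.Set String)) := by
    intro v _ _; simp [PySem.Set.empty]
  by_cases hnd : (cells.filter (fun v => v ≠ ".")).Nodup
  · rw [if_pos ⟨hnd, hfe⟩]
    simp only [Option.isSome_some]
    rw [(length_ofList_eq_iff _).2 hnd]
    simp
  · rw [if_neg (by rintro ⟨h, -⟩; exact hnd h)]
    simp only [Option.isSome_none]
    symm
    rw [beq_eq_false_iff_ne]
    exact fun h => hnd ((length_ofList_eq_iff _).1 h.symm)
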